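-- pv_equiv track=rewrite | github.com/MerlinPCarson/Monopoles | mono_list.py | place_mono
-- ===== SOURCE A (Python) =====
-- def is_additive(x, y, z):
--
--     if (x + y == z):
--         return True
--
--     return False
--
-- def place_mono(cur_monos, new_mono):
--
--     # base case, not enough monopoles in room to be additive
--     if len(cur_monos) < 2:
--         return True
--
--     for i, x in enumerate(cur_monos[:-1]):
--         for y in cur_monos[i+1:]:
--             if is_additive(x, y, new_mono) is True:
--                 return False
--     return True
-- ===== SOURCE B (Python) =====
-- def place_mono(cur_monos, new_mono):
--     # one-pass two-sum: keep a set of seen monopoles; a pair (earlier, x)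
--     # summing to new_mono exists iff new_mono - x was already seen
--     seen = set()
--     for x in cur_monos:
--         if new_mono - x in seen:
--             return False
--         seen.add(x)
--     return True
-- ===== Notes on version B (the rewrite author's own statement) =====
-- stated objective: faster
-- what changed: Replaces the nested pair scan (all i<j with cur_monos[i]+cur_monos[j]==new_mono) by a single pass keeping a hash set of seen values and testing new_mono - x against it.
import Mathlib
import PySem

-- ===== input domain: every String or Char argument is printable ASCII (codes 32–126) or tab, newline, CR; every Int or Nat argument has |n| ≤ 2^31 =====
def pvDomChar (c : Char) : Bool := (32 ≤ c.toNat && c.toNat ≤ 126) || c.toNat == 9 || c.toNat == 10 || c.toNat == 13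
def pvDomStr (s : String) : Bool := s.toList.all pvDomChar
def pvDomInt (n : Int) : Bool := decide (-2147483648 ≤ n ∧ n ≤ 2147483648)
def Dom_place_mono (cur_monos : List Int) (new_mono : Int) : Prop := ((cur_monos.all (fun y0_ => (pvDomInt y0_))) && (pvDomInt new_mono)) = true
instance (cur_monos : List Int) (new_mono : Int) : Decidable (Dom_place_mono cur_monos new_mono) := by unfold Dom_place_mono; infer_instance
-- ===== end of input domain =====

-- B replaces A's O(n^2) nested pair scan by a one-pass hash-set two-sum (asymptotically faster).
-- ===== PORT A =====
def is_additive (x y z : Int) : Bool :=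
  if x + y == z then true else false

-- cur_monos[:-1] and cur_monos[i+1:] are PySem slices; the nested for-loops with early
-- 'return False' are the two nested 'any's, negated.
def place_mono (cur_monos : List Int) (new_mono : Int) : Bool :=
  if cur_monos.length < 2 then true
  else if (PySem.List.enumerate (PySem.List.slice cur_monos none (some (-1)))).any
      (fun p => (PySem.List.slice cur_monos (some (p.1 + 1)) none).any
        (fun y => is_additive p.2 y new_mono)) then
    false
  else
    true

-- ===== PORT B =====
-- the 'for x in cur_monos' loop with the growing 'seen' set, early 'return False'
def altLoop (new_mono : Int) (seen : PySem.Set Int) : List Int → Bool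
  | [] => true
  | x :: rest =>
    if PySem.Set.contains seen (new_mono - x) then false
    else altLoop new_mono (PySem.Set.add seen x) rest

def place_mono_alt (cur_monos : List Int) (new_mono : Int) : Bool :=
  altLoop new_mono PySem.Set.empty cur_monos

-- ===== PRECONDITION & SPEC =====
def Spec_place_mono (cur_monos : List Int) (new_mono : Int) (out : Bool) : Prop := out = place_mono_alt cur_monos new_mono
instance (cur_monos : List Int) (new_mono : Int) (out : Bool) : Decidable (Spec_place_mono cur_monos new_mono out) := by unfold Spec_place_mono; infer_instance

-- ===== CLAIM (what is proved, stated in full; the proofs are below) =====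
def Claim_equal_place_mono : Prop := ∀ (cur_monos : List Int) (new_mono : Int), Dom_place_mono cur_monos new_mono → Spec_place_mono cur_monos new_mono (place_mono cur_monos new_mono)

-- ===== LEMMAS AND PROOFS =====

-- the common mathematical content: some pair i<j sums to t
def pairAny (t : Int) : List Int → Bool
  | [] => false
  | x :: r => r.any (fun y => x + y == t) || pairAny t r

theorem beq_swap (x y t : Int) : ((t - y == x) : Bool) = (x + y == t) := by
  by_cases h : x + y = t <;> simp <;> omega

theorem contains_add (s : PySem.Set Int) (x z : Int) :
    PySem.Set.contains (PySem.Set.add s x) z = (PySem.Set.contains s z || z == x) := by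
  by_cases h : z = x <;> simp [PySem.Set.mem_add, h]

theorem any_orb (l : List Int) (p q : Int → Bool) :
    l.any (fun z => p z || q z) = (l.any p || l.any q) := by
  induction l with
  | nil => simp
  | cons a l ih => simp only [List.any_cons, ih]; cases p a <;> cases q a <;> simp

theorem aLoop_eq (t : Int) : ∀ (ys : List Int) (whole : List Int) (k : Nat),
    whole.drop k = ys →
    ((PySem.List.enumerate ys.dropLast (k : Int)).any
      (fun p => (PySem.List.slice whole (some (p.1 + 1)) none).any
        (fun y => is_additive p.2 y t))) = pairAny t ys := by
  intro ys
  induction ys with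
  | nil => intro whole k h; simp [PySem.List.enumerate_nil, pairAny]
  | cons x r ih =>
    intro whole k h
    cases r with
    | nil => simp [PySem.List.enumerate_nil, pairAny]
    | cons y r' =>
      have hdl : (x :: y :: r').dropLast = x :: (y :: r').dropLast := rfl
      rw [hdl, PySem.List.enumerate_cons, List.any_cons]
      have hk1 : ((k : Int) + 1) = ((k + 1 : Nat) : Int) := by push_cast; ring
      have hdrop : whole.drop (k + 1) = y :: r' := by
        have h1 := congrArg (List.drop 1) h
        simpa [List.drop_drop, Nat.add_comm] using h1
      have hslice : PySem.List.slice whole (some ((k : Int) + 1)) none = y :: r' := by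
        rw [hk1, PySem.List.slice_from_natCast, hdrop]
      rw [hslice, hk1, ih whole (k + 1) hdrop]
      simp [pairAny, is_additive, List.any_eq]

theorem place_mono_eq (xs : List Int) (t : Int) : place_mono xs t = !pairAny t xs := by
  unfold place_mono
  by_cases h : xs.length < 2
  · match xs, h with
    | [], _ => simp [pairAny]
    | [x], _ => simp [pairAny]
  · have key := aLoop_eq t xs xs 0 (by simp)
    simp only [Nat.cast_zero] at key
    rw [if_neg h, PySem.List.slice_to_neg_one, key]
    cases pairAny t xs <;> simp

theorem altLoop_eq (t : Int) : ∀ (xs : List Int) (seen : PySem.Set Int),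
    altLoop t seen xs =
      (!(xs.any (fun x => PySem.Set.contains seen (t - x))) && !pairAny t xs) := by
  intro xs
  induction xs with
  | nil => intro seen; simp [altLoop, pairAny]
  | cons x r ih =>
    intro seen
    rw [altLoop, ih]
    have hco : ∀ z, PySem.Set.contains (PySem.Set.add seen x) (t - z) =
        (PySem.Set.contains seen (t - z) || (x + z == t)) := by
      intro z; rw [contains_add, beq_swap]
    rw [Bool.eq_iff_iff]
    simp only [List.any_cons, pairAny, hco, any_orb]
    simp
    tauto

theorem place_mono_alt_eq (xs : List Int) (t : Int) : place_mono_alt xs t = !pairAny t xs := by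
  rw [place_mono_alt, altLoop_eq]
  simp [PySem.Set.empty]

-- ===== VERDICT (by name: the statement is the Claim_ definition above) =====
theorem place_mono_spec : Claim_equal_place_mono := by
  intro xs t _
  unfold Spec_place_mono
  rw [place_mono_eq, place_mono_alt_eq]
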